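-- pv_equiv track=rewrite | github.com/aguswake1/Computer-Science-UBA | year2.1/introduccionALaProgramacion/practicas/practica_siete.py | cero_en_index_par2
-- ===== SOURCE A (Python) =====
-- def cero_en_index_par2(listaNum: list[int]) -> list[int]:
--     nueva_lista: list[int] = [listaNum[0]]
--
--     for i in range(1, len(listaNum)):
--         if i % 2 == 0:
--             nueva_lista.append(0)
--         else:
--             nueva_lista.append(listaNum[i])
--     return nueva_lista
-- ===== SOURCE B (Python) =====
-- def cero_en_index_par2(listaNum: list[int]) -> list[int]:
--     nueva = list(listaNum)
--     for i in range(2, len(nueva), 2):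
--         nueva[i] = 0
--     return nueva
-- ===== Notes on version B (the rewrite author's own statement) =====
-- stated objective: idiomatic
-- what changed: B copies the list once and overwrites only the even positions from index 2 onward with a strided range loop, instead of A's per-element parity branch that appends item by item starting from an explicit first element.
import Mathlib
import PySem

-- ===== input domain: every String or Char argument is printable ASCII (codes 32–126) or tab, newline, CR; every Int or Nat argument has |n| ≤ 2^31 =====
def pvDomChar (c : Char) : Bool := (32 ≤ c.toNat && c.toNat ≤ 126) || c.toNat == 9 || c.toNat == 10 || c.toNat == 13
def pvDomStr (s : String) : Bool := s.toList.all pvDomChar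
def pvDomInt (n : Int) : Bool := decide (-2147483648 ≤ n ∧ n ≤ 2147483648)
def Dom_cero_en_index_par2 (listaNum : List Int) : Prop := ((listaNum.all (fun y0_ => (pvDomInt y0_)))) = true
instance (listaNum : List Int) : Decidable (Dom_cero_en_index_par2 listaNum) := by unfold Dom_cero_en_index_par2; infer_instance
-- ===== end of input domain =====

-- B copies the list once and zeroes only the even positions from index 2 onward with a strided
-- range loop (idiomatic copy-then-overwrite), instead of A's per-element parity branch appending
-- item by item; equal on every non-empty list (Pre_), A raises IndexError on the empty list where B returns it unchanged.


-- ===== PORT A =====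
-- nueva_lista starts as the singleton of the first element; for i in range(1, len): append 0 if i even else the i-th element
-- (pyGetD is exact under Pre_: every index read, including 0, is in range on a non-empty list)
def cero_en_index_par2 (listaNum : List Int) : List Int :=
  let nueva_lista : List Int := [PySem.List.pyGetD listaNum 0 0]
  (PySem.List.pyRange 1 (listaNum.length : Int) 1).foldl
    (fun acc i => if i % 2 == 0 then acc ++ [0] else acc ++ [PySem.List.pyGetD listaNum i 0])
    nueva_lista

-- ===== PORT B =====
-- nueva = list(listaNum); for i in range(2, len(nueva), 2): nueva[i] = 0
def cero_en_index_par2_alt (listaNum : List Int) : List Int :=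
  let nueva : List Int := listaNum
  (PySem.List.pyRange 2 (nueva.length : Int) 2).foldl
    (fun acc i => PySem.List.pySetD acc i 0) nueva

-- ===== PRECONDITION & SPEC =====
-- A unconditionally reads the element at index 0, so it raises IndexError on the empty list; Pre_ excludes exactly that input.
def Pre_cero_en_index_par2 (listaNum : List Int) : Prop := listaNum ≠ []
instance (listaNum : List Int) : Decidable (Pre_cero_en_index_par2 listaNum) := by unfold Pre_cero_en_index_par2; infer_instance
def pvWitness_cero_en_index_par2 : List Int := [1, 2, 3]

def Spec_cero_en_index_par2 (listaNum : List Int) (out : List Int) : Prop := out = cero_en_index_par2_alt listaNum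
instance (listaNum : List Int) (out : List Int) : Decidable (Spec_cero_en_index_par2 listaNum out) := by unfold Spec_cero_en_index_par2; infer_instance

-- ===== CLAIM (what is proved, stated in full; the proofs are below) =====
def Claim_equal_cero_en_index_par2 : Prop := ∀ (listaNum : List Int), Dom_cero_en_index_par2 listaNum → Pre_cero_en_index_par2 listaNum → Spec_cero_en_index_par2 listaNum (cero_en_index_par2 listaNum)
-- ===== LEMMAS AND PROOFS =====

-- A's loop, closed form: first element followed by the mapped range.
theorem portA_closed (l : List Int) :
    cero_en_index_par2 l =
      PySem.List.pyGetD l 0 0 ::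
        (PySem.List.pyRange 1 (l.length : Int) 1).map
          (fun i => if i % 2 == 0 then 0 else PySem.List.pyGetD l i 0) := by
  unfold cero_en_index_par2
  have hf : (fun (acc : List Int) (i : Int) =>
        if i % 2 == 0 then acc ++ [0] else acc ++ [PySem.List.pyGetD l i 0]) =
      (fun acc i => acc ++ [if i % 2 == 0 then 0 else PySem.List.pyGetD l i 0]) := by
    funext acc i; split <;> rfl
  rw [hf, PySem.List.foldl_append_singleton_eq_map]
  rfl

-- Folding pySetD over nonnegative indices is folding List.set over their toNats.
theorem foldl_pySetD_eq (idxs : List Int) (l : List Int) (h : ∀ i ∈ idxs, 0 ≤ i) :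
    idxs.foldl (fun acc i => PySem.List.pySetD acc i 0) l =
      (idxs.map Int.toNat).foldl (fun acc k => acc.set k 0) l := by
  induction idxs generalizing l with
  | nil => rfl
  | cons i is ih =>
      simp only [List.foldl_cons, List.map_cons]
      rw [PySem.List.pySetD_of_nonneg l 0 (h i (by simp))]
      exact ih _ (fun j hj => h j (by simp [hj]))

theorem getElem?_foldl_set (idxs : List Nat) (l : List Int) (j : Nat) :
    (idxs.foldl (fun acc k => acc.set k 0) l)[j]? =
      if j ∈ idxs ∧ j < l.length then some 0 else l[j]? := by
  induction idxs generalizing l with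
  | nil => simp
  | cons i is ih =>
      simp only [List.foldl_cons]
      rw [ih]
      by_cases hji : j = i
      · subst hji
        by_cases hlen : j < l.length
        · by_cases hmem : j ∈ is <;> simp [hmem, hlen]
        · by_cases hmem : j ∈ is <;>
            simp [hmem, hlen]
      · have hset : (l.set i 0)[j]? = l[j]? := by
          rw [List.getElem?_set, if_neg (by omega)]
        by_cases hmem : j ∈ is <;> simp [hmem, hset, hji, List.length_set]

-- Membership in range(2, n, 2), after pyRange_of_pos, is "even, between 2 and n".
theorem mem_stride (n : Int) (j : Nat) :
    ((PySem.List.pyRange 2 n 2).map Int.toNat).contains j = true ↔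
      (j % 2 = 0 ∧ 2 ≤ j ∧ (j : Int) < n) := by
  rw [PySem.List.pyRange_of_pos 2 n (by norm_num)]
  simp only [List.map_map, List.contains_iff_mem, List.mem_map, List.mem_range,
    Function.comp_apply]
  constructor
  · rintro ⟨k, hk, rfl⟩
    split at hk <;> omega
  · rintro ⟨he, h2, hn⟩
    refine ⟨(j - 2) / 2, ?_, by omega⟩
    split <;> omega

theorem key (l : List Int) (hl : l ≠ []) :
    cero_en_index_par2 l = cero_en_index_par2_alt l := by
  have hn : 0 < l.length := List.length_pos_iff.mpr hl
  have hB : cero_en_index_par2_alt l =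
      ((PySem.List.pyRange 2 (l.length : Int) 2).map Int.toNat).foldl
        (fun acc k => acc.set k 0) l := by
    unfold cero_en_index_par2_alt
    exact foldl_pySetD_eq _ l (by
      intro i hi
      rw [PySem.List.pyRange_of_pos 2 _ (by norm_num)] at hi
      simp only [List.mem_map, List.mem_range] at hi
      obtain ⟨k, _, rfl⟩ := hi; omega)
  rw [portA_closed, hB]
  apply List.ext_getElem?
  intro j
  rw [getElem?_foldl_set]
  have hmem := mem_stride (l.length : Int) j
  rw [List.contains_iff_mem] at hmem
  match j with
  | 0 =>
      have h0 : ¬ ((0 : Nat) ∈ (PySem.List.pyRange 2 ((l.length : Int)) 2).map Int.toNat ∧ 0 < l.length) := by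
        intro ⟨h1, _⟩; have := hmem.mp h1; omega
      rw [if_neg h0, List.getElem?_cons_zero, List.getElem?_eq_getElem hn]
      have : ((0 : Int)) = ((0 : Nat) : Int) := by norm_num
      rw [this, PySem.List.pyGetD_natCast, List.getD_eq_getElem?_getD,
        List.getElem?_eq_getElem hn]
      rfl
  | (j + 1) =>
      rw [List.getElem?_cons_succ, List.getElem?_map]
      by_cases hj : j + 1 < l.length
      · have hjr : j < (PySem.List.pyRange 1 (l.length : Int) 1).length := by
          rw [PySem.List.length_pyRange_one]; omega
        rw [List.getElem?_eq_getElem hjr, PySem.List.getElem_pyRange_one]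
        have h1j : (1 : Int) + (j : Nat) = ((j + 1 : Nat) : Int) := by push_cast; ring
        by_cases hev : (j + 1) % 2 = 0
        · have hin : ((j + 1 : Nat) ∈ (PySem.List.pyRange 2 ((l.length : Int)) 2).map Int.toNat ∧ j + 1 < l.length) :=
            ⟨hmem.mpr ⟨hev, by omega, by exact_mod_cast hj⟩, hj⟩
          have hbe : (((1 : Int) + (j : Nat)) % 2 == 0) = true := by
            rw [h1j]; simp only [beq_iff_eq]; omega
          rw [if_pos hin]
          simp only [Option.map_some]
          rw [if_pos hbe]
        · have hnotmem : ¬ ((j + 1 : Nat) ∈ (PySem.List.pyRange 2 ((l.length : Int)) 2).map Int.toNat ∧ j + 1 < l.length) := by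
            intro ⟨h1, _⟩; exact hev (hmem.mp h1).1
          have hbe : ¬ ((((1 : Int) + (j : Nat)) % 2 == 0) = true) := by
            rw [h1j]; simp only [beq_iff_eq]; omega
          rw [if_neg hnotmem]
          simp only [Option.map_some]
          rw [if_neg hbe, h1j, PySem.List.pyGetD_natCast,
            List.getElem?_eq_getElem hj, List.getD_eq_getElem?_getD,
            List.getElem?_eq_getElem hj]
          rfl
      · have hnotmem : ¬ ((j + 1 : Nat) ∈ (PySem.List.pyRange 2 ((l.length : Int)) 2).map Int.toNat ∧ j + 1 < l.length) := by
          intro ⟨_, h2⟩; omega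
        rw [if_neg hnotmem,
          List.getElem?_eq_none (show (PySem.List.pyRange 1 (l.length : Int) 1).length ≤ j by
            rw [PySem.List.length_pyRange_one]; omega),
          List.getElem?_eq_none (show l.length ≤ j + 1 by omega)]
        rfl

-- ===== VERDICT (by name: the statement is the Claim_ definition above) =====
theorem cero_en_index_par2_spec : Claim_equal_cero_en_index_par2 := by
  intro l _ hpre
  exact key l hpre
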